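-- pv_equiv track=rewrite | github.com/pablotrinidad/competitive-programming | URI/1069/declarative.py | extract_diamonds
-- ===== SOURCE A (Python) =====
-- def extract_diamonds(s):
--     """Diamonds extractor."""
--     d = 0
--     i = 0
--     last_o = None
--     last_c = None
--     while i < len(s) and len(s) > 1:
--         if s[i] == '<':
--             last_o = i
--         elif s[i] == '>' and last_o is not None:
--             last_c = i
--
--         if last_o is not None and last_c is not None:
--             s = s[0:last_o] + s[last_c + 1:]
--             d += 1
--             i = 0
--             last_o = None
--             last_c = None
--         else:
--             i += 1
--     return d
-- ===== SOURCE B (Python) =====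
-- def extract_diamonds(s):
--     """Diamonds extractor: single pass with an open-bracket counter."""
--     open_count = 0
--     d = 0
--     for ch in s:
--         if ch == '<':
--             open_count += 1
--         elif ch == '>' and open_count > 0:
--             open_count -= 1
--             d += 1
--     return d
-- ===== Notes on version B (the rewrite author's own statement) =====
-- stated objective: faster
-- what changed: Replaced A's repeated rescan-and-splice of the string (find a pair, cut it out, restart from index 0) with a single left-to-right pass keeping a counter of unmatched '<', incrementing the result whenever a '>' closes one.
import Mathlib
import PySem

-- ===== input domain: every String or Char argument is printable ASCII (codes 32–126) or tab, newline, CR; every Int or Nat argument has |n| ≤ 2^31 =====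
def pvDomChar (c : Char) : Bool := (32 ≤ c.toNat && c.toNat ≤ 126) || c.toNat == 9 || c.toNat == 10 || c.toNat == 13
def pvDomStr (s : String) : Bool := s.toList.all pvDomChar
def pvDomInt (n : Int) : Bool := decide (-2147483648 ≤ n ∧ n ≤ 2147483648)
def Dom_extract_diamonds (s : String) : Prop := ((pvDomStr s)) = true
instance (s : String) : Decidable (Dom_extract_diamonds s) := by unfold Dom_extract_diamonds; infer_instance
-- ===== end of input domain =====

-- B replaces A's quadratic rescan-and-splice loop with one pass over the string
-- keeping a counter of unmatched '<' (objective: faster, asymptotically).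

-- ===== PORT A =====
/- A's while loop, state (s, i, last_o, last_c, d).  The slices s[0:last_o] and
   s[last_c+1:] have non-negative in-range bounds here, so they are exactly
   List.take / List.drop.  The `h2` test only serves as a totality guard for the
   well-founded recursion: it performs no computation Python does not (on every
   state the Python loop reaches, last_o < last_c < len s, so the spliced string
   is strictly shorter and the guard is true). -/
def pvLoopA (s : List Char) (i : Nat) (lastO lastC : Option Nat) (d : Int) : Int :=
  if h : i < s.length ∧ 1 < s.length then
    match (if s[i]'h.1 = '<' then some i else lastO),
          (if ¬ s[i]'h.1 = '<' ∧ s[i]'h.1 = '>' ∧ lastO.isSome then some i else lastC) with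
    | some o, some ci =>
      if h2 : (s.take o ++ s.drop (ci + 1)).length < s.length then
        pvLoopA (s.take o ++ s.drop (ci + 1)) 0 none none (d + 1)
      else d + 1
    | o', c' => pvLoopA s (i + 1) o' c' d
  else d
termination_by (s.length, s.length - i)
decreasing_by
  · exact Prod.Lex.left _ _ h2
  · exact Prod.Lex.right _ (by omega)

def extract_diamonds (s : String) : Int := pvLoopA s.toList 0 none none 0

-- ===== PORT B =====
/- One fold step of Source B's for-loop: state (open_count, d). -/
def pvStepB (st : Int × Int) (c : Char) : Int × Int :=
  if c = '<' then (st.1 + 1, st.2)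
  else if c = '>' ∧ st.1 > 0 then (st.1 - 1, st.2 + 1)
  else st

def extract_diamonds_alt (s : String) : Int := (s.toList.foldl pvStepB (0, 0)).2

-- ===== PRECONDITION & SPEC =====
def Spec_extract_diamonds (s : String) (out : Int) : Prop := out = extract_diamonds_alt s
instance (s : String) (out : Int) : Decidable (Spec_extract_diamonds s out) := by unfold Spec_extract_diamonds; infer_instance

-- ===== CLAIM (what is proved, stated in full; the proofs are below) =====
def Claim_equal_extract_diamonds : Prop := ∀ (s : String), Dom_extract_diamonds s → Spec_extract_diamonds s (extract_diamonds s)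

-- ===== LEMMAS AND PROOFS =====

/-- The `d` component of B's fold is a pure accumulator: shifting it shifts the result. -/
theorem pvShift (l : List Char) : ∀ (o d k : Int),
    l.foldl pvStepB (o, d + k) = ((l.foldl pvStepB (o, d)).1, (l.foldl pvStepB (o, d)).2 + k) := by
  induction l with
  | nil => intro o d k; simp
  | cons c t ih =>
    intro o d k
    simp only [List.foldl_cons, pvStepB]
    split_ifs with h1 h2
    · exact ih (o + 1) d k
    · have : d + k + 1 = (d + 1) + k := by ring
      rw [this]; exact ih (o - 1) (d + 1) k
    · exact ih o d k

theorem pvNonneg (l : List Char) : ∀ (o d : Int), 0 ≤ o → 0 ≤ (l.foldl pvStepB (o, d)).1 := by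
  induction l with
  | nil => intro o d h; simpa
  | cons c t ih =>
    intro o d h
    simp only [List.foldl_cons, pvStepB]
    split_ifs with h1 h2
    · exact ih (o + 1) d (by omega)
    · exact ih (o - 1) (d + 1) (by omega)
    · exact ih o d h

theorem pvNoGT (l : List Char) (hl : ∀ c ∈ l, c ≠ '>') : ∀ st : Int × Int,
    (l.foldl pvStepB st).2 = st.2 := by
  induction l with
  | nil => intro st; simp
  | cons c t ih =>
    intro st
    have hc : c ≠ '>' := hl c (by simp)
    have ht : ∀ c ∈ t, c ≠ '>' := fun x hx => hl x (by simp [hx])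
    simp only [List.foldl_cons, pvStepB]
    split_ifs with h1 h2
    · exact ih ht _
    · exact absurd h2.1 hc
    · exact ih ht _

theorem pvNoBr (l : List Char) (hl : ∀ c ∈ l, c ≠ '<' ∧ c ≠ '>') : ∀ st : Int × Int,
    l.foldl pvStepB st = st := by
  induction l with
  | nil => intro st; simp
  | cons c t ih =>
    intro st
    have hc := hl c (by simp)
    have ht : ∀ c ∈ t, c ≠ '<' ∧ c ≠ '>' := fun x hx => hl x (by simp [hx])
    simp only [List.foldl_cons, pvStepB]
    split_ifs with h1 h2
    · exact absurd h1 hc.1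
    · exact absurd h2.1 hc.2
    · exact ih ht st

/-- Every '>' in `l` has no '<' strictly before it. -/
def pvGood (l : List Char) : Prop :=
  ∀ j, (hj : j < l.length) → l[j] = '>' → ∀ k, (hk : k < l.length) → k < j → l[k] ≠ '<'

theorem pvGood_cons {c : Char} {t : List Char} (h : pvGood (c :: t)) : pvGood t := by
  intro j hj hgt k hk hkj
  have := h (j + 1) (by simpa using Nat.succ_lt_succ hj) (by simpa using hgt)
    (k + 1) (by simp; omega) (by omega)
  simpa using this

/-- On a `pvGood` list, B's fold starting with no open bracket adds nothing. -/
theorem pvGoodZero (l : List Char) : pvGood l → ∀ d : Int, (l.foldl pvStepB (0, d)).2 = d := by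
  induction l with
  | nil => intro _ d; simp
  | cons c t ih =>
    intro hg d
    simp only [List.foldl_cons, pvStepB]
    split_ifs with h1 h2
    · -- c = '<': no '>' can occur in t
      have hnt : ∀ x ∈ t, x ≠ '>' := by
        intro x hx hxgt
        obtain ⟨j, hj, rfl⟩ := List.mem_iff_getElem.1 hx
        exact hg (j + 1) (by simp; omega) (by simp [hxgt])
          0 (by simp) (by omega) (by simp [h1])
      exact pvNoGT t hnt _
    · exact absurd h2.2 (by norm_num)
    · exact ih (pvGood_cons hg) d

/-- Removing one innermost pair (with bracket-free middle) lowers the count by exactly 1. -/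
theorem pvRemove (p m t : List Char) (hm : ∀ c ∈ m, c ≠ '<' ∧ c ≠ '>') :
    ((p ++ '<' :: (m ++ '>' :: t)).foldl pvStepB (0, 0)).2
      = ((p ++ t).foldl pvStepB (0, 0)).2 + 1 := by
  have hnn : 0 ≤ (p.foldl pvStepB (0, 0)).1 := pvNonneg p 0 0 (by norm_num)
  set st := p.foldl pvStepB (0, 0) with hst
  have h1 : pvStepB st '<' = (st.1 + 1, st.2) := by simp [pvStepB]
  have h2 : pvStepB (st.1 + 1, st.2) '>' = (st.1, st.2 + 1) := by
    have hpos : st.1 + 1 > 0 := by omega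
    simp [pvStepB, hpos]
  rw [List.foldl_append, List.foldl_append, List.foldl_cons, h1, List.foldl_append,
    pvNoBr m hm, List.foldl_cons, h2, pvShift t st.1 st.2 1, ← hst]

/-- A's loop invariant at state (s, i, lastO): every '>' in the scanned prefix has no
    '<' before it, and lastO records the last '<' of the prefix (none if there is none). -/
def pvInv (s : List Char) (i : Nat) (lo : Option Nat) : Prop :=
  (∀ j, (hj : j < s.length) → j < i → s[j] = '>' →
      ∀ k, (hk : k < s.length) → k < j → s[k] ≠ '<')
  ∧ (match lo with
     | none => ∀ j, (hj : j < s.length) → j < i → s[j] ≠ '<'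
     | some o => o < i ∧ ∃ ho : o < s.length, s[o] = '<' ∧
         ∀ j, (hj : j < s.length) → o < j → j < i → s[j] ≠ '<')

-- Unfolding equations for pvLoopA, one per branch of A's loop body.
theorem L_exit (s : List Char) (i : Nat) (lo lc : Option Nat) (d : Int)
    (h : ¬ (i < s.length ∧ 1 < s.length)) : pvLoopA s i lo lc d = d := by
  rw [pvLoopA, dif_neg h]

theorem L_open (s : List Char) (i : Nat) (lo : Option Nat) (d : Int)
    (h1 : i < s.length) (h2 : 1 < s.length) (hc : s[i]'h1 = '<') :
    pvLoopA s i lo none d = pvLoopA s (i + 1) (some i) none d := by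
  rw [pvLoopA, dif_pos ⟨h1, h2⟩, if_pos hc, if_neg (by simp [hc])]

theorem L_gtnone (s : List Char) (i : Nat) (d : Int)
    (h1 : i < s.length) (h2 : 1 < s.length) (hc : s[i]'h1 = '>') :
    pvLoopA s i none none d = pvLoopA s (i + 1) none none d := by
  rw [pvLoopA, dif_pos ⟨h1, h2⟩, if_neg (by simp [hc]), if_neg (by simp)]

theorem L_other (s : List Char) (i : Nat) (lo : Option Nat) (d : Int)
    (h1 : i < s.length) (h2 : 1 < s.length) (hc1 : ¬ s[i]'h1 = '<') (hc2 : ¬ s[i]'h1 = '>') :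
    pvLoopA s i lo none d = pvLoopA s (i + 1) lo none d := by
  rw [pvLoopA, dif_pos ⟨h1, h2⟩, if_neg hc1, if_neg (by simp [hc2])]
  cases lo <;> rfl

theorem L_rem (s : List Char) (i o : Nat) (d : Int)
    (h1 : i < s.length) (h2 : 1 < s.length) (hc : s[i]'h1 = '>')
    (hlt : (s.take o ++ s.drop (i + 1)).length < s.length) :
    pvLoopA s i (some o) none d = pvLoopA (s.take o ++ s.drop (i + 1)) 0 none none (d + 1) := by
  rw [pvLoopA, dif_pos ⟨h1, h2⟩, if_neg (by simp [hc]), if_pos (by simp [hc])]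
  exact dif_pos hlt

theorem pvInv_zero (s : List Char) : pvInv s 0 none :=
  ⟨fun j _ hji => absurd hji (Nat.not_lt_zero j), fun j _ hji => absurd hji (Nat.not_lt_zero j)⟩

/-- Splitting `s` at a position `o` (holding `s[o]`) and a later position `i` (holding `s[i]`). -/
theorem pvDecomp (s : List Char) (o i : Nat) (h1 : i < s.length) (ho : o < s.length)
    (hoi : o < i) :
    s = s.take o ++ (s[o]'ho) :: (((s.take i).drop (o + 1)) ++ (s[i]'h1) :: s.drop (i + 1)) := by
  have e1 : s = s.take i ++ s.drop i := (List.take_append_drop i s).symm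
  have e2 : s.drop i = (s[i]'h1) :: s.drop (i + 1) := List.drop_eq_getElem_cons h1
  have e3 : s.take i = s.take (o + 1) ++ (s.take i).drop (o + 1) := by
    have h := (List.take_append_drop (o + 1) (s.take i)).symm
    rw [List.take_take, min_eq_left (by omega)] at h
    exact h
  have e4 : s.take (o + 1) = s.take o ++ [s[o]'ho] := by
    rw [List.take_add_one, List.getElem?_eq_getElem ho]
    rfl
  conv_lhs => rw [e1, e2, e3]
  rw [e4, List.append_assoc, List.append_assoc]
  rfl

/-- The characters strictly between the matched '<' at `o` and '>' at `i` are bracket-free. -/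
theorem pvMidFacts (s : List Char) (o i : Nat) (h1 : i < s.length) (ho : o < s.length)
    (hoi : o < i) (hso : s[o]'ho = '<')
    (hgap : ∀ j, (hj : j < s.length) → o < j → j < i → s[j] ≠ '<')
    (hpre : ∀ j, (hj : j < s.length) → j < i → s[j] = '>' →
      ∀ k, (hk : k < s.length) → k < j → s[k] ≠ '<') :
    ∀ c ∈ (s.take i).drop (o + 1), c ≠ '<' ∧ c ≠ '>' := by
  intro x hx
  obtain ⟨jj, hjj, rfl⟩ := List.mem_iff_getElem.1 hx
  have hlen : ((s.take i).drop (o + 1)).length = i - (o + 1) := by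
    simp [List.length_drop, List.length_take]
    omega
  rw [hlen] at hjj
  have hidx : ((s.take i).drop (o + 1))[jj]'(by rw [hlen]; omega)
      = s[o + 1 + jj]'(by omega) := by
    rw [List.getElem_drop, List.getElem_take]
  rw [hidx]
  constructor
  · exact hgap (o + 1 + jj) (by omega) (by omega) (by omega)
  · intro hgt
    exact hpre (o + 1 + jj) (by omega) (by omega) hgt o (by omega) (by omega) hso

/-- Removing the matched pair at positions `o < i` lowers B's count by exactly 1. -/
theorem pvCount_rem (s : List Char) (o i : Nat) (h1 : i < s.length) (ho : o < s.length)
    (hoi : o < i) (hso : s[o]'ho = '<') (hgt : s[i]'h1 = '>')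
    (hgap : ∀ j, (hj : j < s.length) → o < j → j < i → s[j] ≠ '<')
    (hpre : ∀ j, (hj : j < s.length) → j < i → s[j] = '>' →
      ∀ k, (hk : k < s.length) → k < j → s[k] ≠ '<') :
    (s.foldl pvStepB (0, 0)).2 = ((s.take o ++ s.drop (i + 1)).foldl pvStepB (0, 0)).2 + 1 := by
  have hm := pvMidFacts s o i h1 ho hoi hso hgap hpre
  have hr := pvRemove (s.take o) ((s.take i).drop (o + 1)) (s.drop (i + 1)) hm
  have hdec := pvDecomp s o i h1 ho hoi
  rw [hso, hgt] at hdec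
  rw [← hdec] at hr
  exact hr

/-- At loop exit the invariant forces B's count of the remaining string to be zero. -/
theorem pvEnd (s : List Char) (i : Nat) (lo : Option Nat) (hinv : pvInv s i lo)
    (h : ¬ (i < s.length ∧ 1 < s.length)) : (s.foldl pvStepB (0, 0)).2 = 0 := by
  by_cases hlen : 1 < s.length
  · have hg : pvGood s := fun j hj hgt k hk hkj => hinv.1 j hj (by omega) hgt k hk hkj
    exact pvGoodZero s hg 0
  · match s with
    | [] => simp
    | [a] =>
      simp only [List.foldl_cons, List.foldl_nil, pvStepB]
      split_ifs with ha hb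
      · rfl
      · exact absurd hb.2 (by norm_num)
      · rfl
    | a :: b :: t => exfalso; simp at hlen

theorem pvMain : ∀ (s : List Char) (i : Nat) (lo lc : Option Nat) (d : Int),
    pvInv s i lo → lc = none →
    pvLoopA s i lo lc d = d + (s.foldl pvStepB (0, 0)).2 := by
  intro s i lo lc d
  induction s, i, lo, lc, d using pvLoopA.induct with
  | case1 s i lastO lastC d h o ci hC hO hlt ih =>
    intro hinv hlc
    subst hlc
    split at hC
    case isTrue hcond =>
      obtain ⟨hne, hgt, _⟩ := hcond
      injection hC with hci
      subst hci
      rw [dif_neg hne] at hO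
      subst hO
      obtain ⟨hpre, hoi, holt, hso, hgap⟩ := hinv
      rw [L_rem s i o d h.1 h.2 hgt hlt, ih (pvInv_zero _) rfl,
        pvCount_rem s o i h.1 holt hoi hso hgt hgap (fun j hj hji => hpre j hj hji)]
      ring
    case isFalse => exact absurd hC (by simp)
  | case2 s i lastO lastC d h o ci hC hO hnlt =>
    intro hinv hlc
    subst hlc
    split at hC
    case isTrue hcond =>
      obtain ⟨hne, hgt, _⟩ := hcond
      injection hC with hci
      subst hci
      rw [dif_neg hne] at hO
      subst hO
      obtain ⟨hpre, hoi, holt, hso, hgap⟩ := hinv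
      exfalso
      apply hnlt
      simp only [List.length_append, List.length_take, List.length_drop]
      omega
    case isFalse => exact absurd hC (by simp)
  | case3 s i lastO lastC d h hnot ih =>
    intro hinv hlc
    subst hlc
    by_cases hc1 : s[i]'h.1 = '<'
    · rw [L_open s i lastO d h.1 h.2 hc1]
      rw [dif_pos hc1, dif_neg (by simp [hc1])] at ih
      refine ih ⟨?_, ?_⟩ rfl
      · intro j hj hji hgtj k hk hkj
        rcases Nat.lt_succ_iff_lt_or_eq.1 hji with hj' | rfl
        · exact hinv.1 j hj hj' hgtj k hk hkj
        · rw [hc1] at hgtj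
          exact absurd hgtj (by decide)
      · exact ⟨by omega, h.1, hc1, fun j hj hij hji => by omega⟩
    · by_cases hc2 : s[i]'h.1 = '>'
      · have hlo : lastO = none := by
          cases lastO with
          | none => rfl
          | some o =>
            exact absurd (hnot o i (dif_neg hc1) (dif_pos ⟨hc1, hc2, rfl⟩)) id
        subst hlo
        rw [L_gtnone s i d h.1 h.2 hc2]
        rw [dif_neg hc1, dif_neg (by simp)] at ih
        refine ih ⟨?_, ?_⟩ rfl
        · intro j hj hji hgtj k hk hkj
          rcases Nat.lt_succ_iff_lt_or_eq.1 hji with hj' | rfl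
          · exact hinv.1 j hj hj' hgtj k hk hkj
          · exact hinv.2 k hk hkj
        · intro j hj hji
          rcases Nat.lt_succ_iff_lt_or_eq.1 hji with hj' | rfl
          · exact hinv.2 j hj hj'
          · rw [hc2]; decide
      · rw [L_other s i lastO d h.1 h.2 hc1 hc2]
        rw [dif_neg hc1, dif_neg (by simp [hc2])] at ih
        refine ih ⟨?_, ?_⟩ rfl
        · intro j hj hji hgtj k hk hkj
          rcases Nat.lt_succ_iff_lt_or_eq.1 hji with hj' | rfl
          · exact hinv.1 j hj hj' hgtj k hk hkj
          · exact absurd hgtj hc2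
        · cases hO : lastO with
          | none =>
            rw [hO] at hinv
            intro j hj hji
            rcases Nat.lt_succ_iff_lt_or_eq.1 hji with hj' | rfl
            · exact hinv.2 j hj hj'
            · exact hc1
          | some o =>
            rw [hO] at hinv
            obtain ⟨hoi, holt, hso, hgap⟩ := hinv.2
            refine ⟨by omega, holt, hso, ?_⟩
            intro j hj hij hji
            rcases Nat.lt_succ_iff_lt_or_eq.1 hji with hj' | rfl
            · exact hgap j hj hij hj'
            · exact hc1
  | case4 s i lastO lastC d h =>
    intro hinv hlc
    subst hlc
    rw [L_exit s i lastO none d h, pvEnd s i lastO hinv h]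
    ring

-- ===== VERDICT (by name: the statement is the Claim_ definition above) =====
theorem extract_diamonds_spec : Claim_equal_extract_diamonds := by
  intro s _
  unfold Spec_extract_diamonds extract_diamonds extract_diamonds_alt
  rw [pvMain s.toList 0 none none 0 (pvInv_zero _) rfl]
  ring
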